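-- pv_equiv track=rewrite | github.com/kesrisk/practice | shivam/codechef 1.py | checkCOVID19Queue
-- ===== SOURCE A (Python) =====
-- def checkCOVID19Queue(arr, n):
--     start = 0
--     count = 0
--
--     for i in range(n):
--         if arr[i] == 1:
--             start = i
--             break
--
--     for i in range(start+1, n):
--         if arr[i] == 0:
--             count += 1
--         else:
--             if count >= 5:
--                 # safe
--                 count = 0
--             else:
--                 return "NO"
--     return "YES"
-- ===== SOURCE B (Python) =====
-- def checkCOVID19Queue(arr, n):
--     start = next((i for i in range(n) if arr[i] == 1), 0)
--     persons = [start] + [i for i in range(start + 1, n) if arr[i] != 0]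
--     return "YES" if all(q - p >= 6 for p, q in zip(persons, persons[1:])) else "NO"
-- ===== Notes on version B (the rewrite author's own statement) =====
-- stated objective: idiomatic
-- what changed: Replaced the running zero-counter/reset state machine with an explicit list of occupied positions (first ==1 index, then every later non-zero index) and a pairwise gap >= 6 check over consecutive positions.
-- outside the precondition, e.g. on checkCOVID19Queue([9, 119, 5, 1, -1, 5], 8): A returns 'NO', B raises IndexError
import Mathlib
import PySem

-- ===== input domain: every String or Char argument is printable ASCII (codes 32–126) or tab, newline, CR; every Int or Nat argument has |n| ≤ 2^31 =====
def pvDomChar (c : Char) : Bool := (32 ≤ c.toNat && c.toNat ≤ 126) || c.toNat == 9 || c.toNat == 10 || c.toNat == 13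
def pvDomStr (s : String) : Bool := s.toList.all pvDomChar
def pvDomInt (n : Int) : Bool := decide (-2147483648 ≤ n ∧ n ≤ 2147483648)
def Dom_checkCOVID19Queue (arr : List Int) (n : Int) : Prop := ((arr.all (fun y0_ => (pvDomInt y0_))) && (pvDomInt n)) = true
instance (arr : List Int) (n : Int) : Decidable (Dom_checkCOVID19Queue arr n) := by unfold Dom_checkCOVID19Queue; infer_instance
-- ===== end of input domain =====

-- B replaces A's zero-counter/reset state machine with a positions list and pairwise gap checks (idiomatic decomposition, same O(n) cost); return values proved equal whenever 0-based indexing stays in range (n ≤ len(arr)).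

-- ===== PORT A =====
-- first loop of A: 'for i in range(n): if arr[i] == 1: start = i; break', as a counted
-- recursion over the loop index; pyGet? none = IndexError (unreachable under Pre_)
def checkCOVID19Queue_findStart (arr : List Int) : Nat → Int → Int
  | 0, _ => 0
  | fuel + 1, i =>
    match PySem.List.pyGet? arr i with
    | none => 0
    | some v => if v = 1 then i else checkCOVID19Queue_findStart arr fuel (i + 1)

-- second loop of A over range(start+1, n) with the running zero counter;
-- pyGet? none = IndexError (unreachable under Pre_)
def checkCOVID19Queue_loop (arr : List Int) : Nat → Int → Int → String
  | 0, _, _ => "YES"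
  | fuel + 1, i, count =>
    match PySem.List.pyGet? arr i with
    | none => "YES"
    | some v =>
      if v = 0 then checkCOVID19Queue_loop arr fuel (i + 1) (count + 1)
      else if count ≥ 5 then checkCOVID19Queue_loop arr fuel (i + 1) 0
      else "NO"

def checkCOVID19Queue (arr : List Int) (n : Int) : String :=
  let start := checkCOVID19Queue_findStart arr n.toNat 0
  checkCOVID19Queue_loop arr (n - (start + 1)).toNat (start + 1) 0

-- ===== PORT B =====
def checkCOVID19Queue_alt (arr : List Int) (n : Int) : String :=
  let start := ((PySem.List.pyRange 0 n 1).find? (fun i => PySem.List.pyGetD arr i 0 == 1)).getD 0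
  let persons := start :: (PySem.List.pyRange (start + 1) n 1).filter (fun i => PySem.List.pyGetD arr i 0 != 0)
  if (persons.zip persons.tail).all (fun pq => 6 ≤ pq.2 - pq.1) then "YES" else "NO"

-- ===== PRECONDITION & SPEC =====
-- Pre_ excludes n > len(arr), where indexing runs off the list: A usually raises IndexError
-- there (and can only return an early "NO" by accident, before reaching the bad index), and
-- B itself raises IndexError there while building its positions list.
def Pre_checkCOVID19Queue (arr : List Int) (n : Int) : Prop := n ≤ (arr.length : Int)
instance (arr : List Int) (n : Int) : Decidable (Pre_checkCOVID19Queue arr n) := by unfold Pre_checkCOVID19Queue; infer_instance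
def pvWitness_checkCOVID19Queue : List Int × Int := ([1, 0, 0, 0, 0, 0, 1], 7)

def Spec_checkCOVID19Queue (arr : List Int) (n : Int) (out : String) : Prop := out = checkCOVID19Queue_alt arr n
instance (arr : List Int) (n : Int) (out : String) : Decidable (Spec_checkCOVID19Queue arr n out) := by unfold Spec_checkCOVID19Queue; infer_instance

-- ===== CLAIM (what is proved, stated in full; the proofs are below) =====
def Claim_equal_checkCOVID19Queue : Prop := ∀ (arr : List Int) (n : Int), Dom_checkCOVID19Queue arr n → Pre_checkCOVID19Queue arr n → Spec_checkCOVID19Queue arr n (checkCOVID19Queue arr n)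

-- ===== LEMMAS AND PROOFS =====

-- B's pairwise check, written as a "gap from previous position p" recursion
def gapChk (p : Int) : List Int → Bool
  | [] => true
  | q :: rest => (6 ≤ q - p) && gapChk q rest

theorem zip_all_eq_gapChk (p : Int) (ps : List Int) :
    (((p :: ps).zip ps).all (fun pq => 6 ≤ pq.2 - pq.1)) = gapChk p ps := by
  induction ps generalizing p with
  | nil => rfl
  | cons q rest ih =>
    have h := ih q
    simp only [List.zip] at h ⊢
    simp [gapChk, h, Bool.and_comm]

theorem findStart_eq_find? (arr : List Int) :
    ∀ (fuel : Nat) (i : Int), 0 ≤ i →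
      (fuel = 0 ∨ i + (fuel : Int) ≤ (arr.length : Int)) →
    checkCOVID19Queue_findStart arr fuel i
      = (((PySem.List.pyRange i (i + (fuel : Int)) 1).find?
            (fun j => PySem.List.pyGetD arr j 0 == 1)).getD 0) := by
  intro fuel
  induction fuel with
  | zero =>
    intro i hi _
    rw [PySem.List.pyRange_one_eq_nil (by simp)]
    simp [checkCOVID19Queue_findStart]
  | succ m ih =>
    intro i hi hlen
    have hlen' : i + ((m : Int) + 1) ≤ (arr.length : Int) := by
      rcases hlen with h | h
      · exact absurd h (by omega)
      · push_cast at h; omega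
    have hil : i < (arr.length : Int) := by omega
    have hv : PySem.List.pyGet? arr i = some (arr[i.toNat]'(by omega)) := by
      rw [PySem.List.pyGet?_of_nonneg _ hi]
      exact List.getElem?_eq_getElem _
    have hd : PySem.List.pyGetD arr i 0 = arr[i.toNat]'(by omega) := by
      simp [PySem.List.pyGetD, hv]
    have hcons : PySem.List.pyRange i (i + ((m : Nat) + 1 : Nat)) 1
        = i :: PySem.List.pyRange (i + 1) ((i + 1) + (m : Int)) 1 := by
      rw [PySem.List.pyRange_one_cons (by push_cast; omega)]
      congr 1
      congr 1
      push_cast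
      ring
    rw [hcons]
    by_cases h1 : arr[i.toNat]'(by omega) = 1
    · simp [checkCOVID19Queue_findStart, hv, h1, List.find?, hd]
    · have hb : (PySem.List.pyGetD arr i 0 == 1) = false := by simp [hd, h1]
      simp only [checkCOVID19Queue_findStart, hv, h1, if_neg h1, List.find?, hb]
      exact ih (i + 1) (by omega) (Or.inr (by omega))

-- Main invariant: A's second loop starting at index i with counter c equals the pairwise
-- gap check over the non-zero positions of range(i, i+fuel), with previous position i-c-1.
theorem loop_eq_gapChk (arr : List Int) :
    ∀ (fuel : Nat) (i c : Int), 0 ≤ i →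
      (fuel = 0 ∨ i + (fuel : Int) ≤ (arr.length : Int)) →
    checkCOVID19Queue_loop arr fuel i c
      = (if gapChk (i - c - 1)
            ((PySem.List.pyRange i (i + (fuel : Int)) 1).filter
              (fun j => PySem.List.pyGetD arr j 0 != 0))
          then "YES" else "NO") := by
  intro fuel
  induction fuel with
  | zero =>
    intro i c hi _
    rw [PySem.List.pyRange_one_eq_nil (by simp)]
    simp [checkCOVID19Queue_loop, gapChk]
  | succ m ih =>
    intro i c hi hlen
    have hlen' : i + ((m : Int) + 1) ≤ (arr.length : Int) := by
      rcases hlen with h | h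
      · exact absurd h (by omega)
      · push_cast at h; omega
    have hil : i < (arr.length : Int) := by omega
    have hv : PySem.List.pyGet? arr i = some (arr[i.toNat]'(by omega)) := by
      rw [PySem.List.pyGet?_of_nonneg _ hi]
      exact List.getElem?_eq_getElem _
    have hd : PySem.List.pyGetD arr i 0 = arr[i.toNat]'(by omega) := by
      simp [PySem.List.pyGetD, hv]
    have hcons : PySem.List.pyRange i (i + ((m : Nat) + 1 : Nat)) 1
        = i :: PySem.List.pyRange (i + 1) ((i + 1) + (m : Int)) 1 := by
      rw [PySem.List.pyRange_one_cons (by push_cast; omega)]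
      congr 1
      congr 1
      push_cast
      ring
    rw [hcons]
    by_cases h0 : arr[i.toNat]'(by omega) = 0
    · have hstep := ih (i + 1) (c + 1) (by omega) (Or.inr (by omega))
      have hprev : i + 1 - (c + 1) - 1 = i - c - 1 := by ring
      rw [hprev] at hstep
      simp [checkCOVID19Queue_loop, hv, h0, hd, hstep]
    · have hstep := ih (i + 1) 0 (by omega) (Or.inr (by omega))
      have hs : i + 1 - 0 - 1 = i := by ring
      rw [hs] at hstep
      by_cases hc : (5 : Int) ≤ c
      · have h6 : 6 ≤ i - (i - c - 1) := by omega
        simp [checkCOVID19Queue_loop, hv, h0, hd, hc, hstep, gapChk, h6]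
      · have h6 : ¬ 6 ≤ i - (i - c - 1) := by omega
        simp [checkCOVID19Queue_loop, hv, h0, hd, hc, gapChk, h6]

theorem pyRange_eq_toNat_form (a n : Int) :
    PySem.List.pyRange a n 1 = PySem.List.pyRange a (a + ((n - a).toNat : Int)) 1 := by
  by_cases h : a ≤ n
  · congr 1
    omega
  · rw [PySem.List.pyRange_one_eq_nil (by omega), PySem.List.pyRange_one_eq_nil (by omega)]

-- ===== VERDICT (by name: the statement is the Claim_ definition above) =====
theorem checkCOVID19Queue_spec : Claim_equal_checkCOVID19Queue := by
  intro arr n _ hpre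
  unfold Pre_checkCOVID19Queue at hpre
  unfold Spec_checkCOVID19Queue checkCOVID19Queue checkCOVID19Queue_alt
  have h0 : (0 : Int) + ((n - 0).toNat : Int) = (n.toNat : Int) := by omega
  have hfind : checkCOVID19Queue_findStart arr n.toNat 0
      = ((PySem.List.pyRange 0 n 1).find? (fun j => PySem.List.pyGetD arr j 0 == 1)).getD 0 := by
    rw [pyRange_eq_toNat_form 0 n]
    rw [findStart_eq_find? arr n.toNat 0 (le_refl 0) (by omega), h0]
    norm_num
  rw [hfind]
  set start := ((PySem.List.pyRange 0 n 1).find? (fun j => PySem.List.pyGetD arr j 0 == 1)).getD 0 with hstart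
  have hs0 : 0 ≤ start := by
    rcases hf : (PySem.List.pyRange 0 n 1).find? (fun j => PySem.List.pyGetD arr j 0 == 1) with _ | x
    · simp [hstart, hf]
    · have hx : x ∈ PySem.List.pyRange 0 n 1 := List.mem_of_find?_eq_some hf
      rw [PySem.List.mem_pyRange_one] at hx
      simp [hstart, hf]
      omega
  have hloop := loop_eq_gapChk arr (n - (start + 1)).toNat (start + 1) 0 (by omega) (by omega)
  rw [← pyRange_eq_toNat_form (start + 1) n] at hloop
  rw [hloop]
  have hprev : start + 1 - 0 - 1 = start := by ring
  rw [hprev]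
  simp only [List.tail_cons, zip_all_eq_gapChk]
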